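-- pv_equiv track=rewrite | github.com/applego/Algorithm_etc | codewars/途中_6_kyu_Checkerboard_Resolution.py | count_checkerboard
-- ===== SOURCE A (Python) =====
-- def count_checkerboard(width, height, resolution):
--     # 1. width * heightのマス目に左上から白色の正方形（長さresolution or width）を置いていく
--     # 2. まだスペースがあれば(resolution*1がwidthより小さければ)、1の右隣に黒色の正方形を置く（長さresolution or (width-(1*resolutin))）
--     # 3. まだスペースがあれば(resolution*2がwidthより小さければ)、2の右隣に白色の正方形を置く（長さresolution or (width-(2*resolutin))）
--     # ...スペースがなくなるまで繰り返す
--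
--     total_masu = width * height
--     if resolution > width and resolution > height:
--         return total_masu
--
--     # 1行目を作る
--     index_wide = 0
--     wihte_count = 0
--     black_count = 0
--     current_wihte = True
--     while index_wide + resolution <= width:
--         index_wide += resolution
--         if current_wihte:
--             wihte_count += resolution
--         else:
--             black_count += resolution
--         current_wihte = not current_wihte
--     else:
--         if current_wihte:
--             wihte_count += width - index_wide
--             # index_wide += width - index_wide
--         else:
--             black_count += width - index_wide
--             # index_wide += width - index_wide
--
--     row1_white = wihte_count
--     row1_black = black_count
--
--     if height <= 1:
--         return black_count
--
--     # 2行目以降を作る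
--     # 1行目の白黒の数を使って、2行目以降の白黒の数を決める
--     current_wihte = False if resolution == 1 else True
--     index_height = 1
--     index_in_resolution = 1
--     while index_height < height:
--         if current_wihte:
--             wihte_count += row1_white
--             black_count += row1_black
--         else:
--             black_count += row1_white
--             wihte_count += row1_black
--
--         index_height += 1
--         index_in_resolution += 1
--         if index_in_resolution == resolution or resolution == 1:
--             index_in_resolution = 0
--             current_wihte = not current_wihte
--     return black_count
-- ===== SOURCE B (Python) =====
-- def count_checkerboard(width, height, resolution):
--     # Closed-form O(1) version: count cells/rows per alternating band by periodicity.
--     if resolution > width and resolution > height: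
--         return width * height
--     # row 1: k full blocks of size `resolution` starting white, plus a remainder block
--     k = max(width // resolution, 0)
--     rem = width - k * resolution
--     row_white = (k + 1) // 2 * resolution + (rem if k % 2 == 0 else 0)
--     row_black = k // 2 * resolution + (rem if k % 2 == 1 else 0)
--     if height <= 1:
--         return row_black
--     # rows: band t (0-based row index) starts white iff (t // resolution) % 2 == 0
--     q = height // resolution
--     remr = height - q * resolution
--     white_rows = (q + 1) // 2 * resolution + (remr if q % 2 == 0 else 0)
--     return white_rows * row_black + (height - white_rows) * row_white
-- ===== Notes on version B (the rewrite author's own statement) =====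
-- stated objective: faster
-- what changed: Replaces the per-block row loop and the per-row band loop by closed-form arithmetic (floor divisions) counting full alternating blocks/bands and the remainder directly.
-- outside the precondition, e.g. on count_checkerboard(-5, 3, -1): A returns 0, B returns -8
import Mathlib
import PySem

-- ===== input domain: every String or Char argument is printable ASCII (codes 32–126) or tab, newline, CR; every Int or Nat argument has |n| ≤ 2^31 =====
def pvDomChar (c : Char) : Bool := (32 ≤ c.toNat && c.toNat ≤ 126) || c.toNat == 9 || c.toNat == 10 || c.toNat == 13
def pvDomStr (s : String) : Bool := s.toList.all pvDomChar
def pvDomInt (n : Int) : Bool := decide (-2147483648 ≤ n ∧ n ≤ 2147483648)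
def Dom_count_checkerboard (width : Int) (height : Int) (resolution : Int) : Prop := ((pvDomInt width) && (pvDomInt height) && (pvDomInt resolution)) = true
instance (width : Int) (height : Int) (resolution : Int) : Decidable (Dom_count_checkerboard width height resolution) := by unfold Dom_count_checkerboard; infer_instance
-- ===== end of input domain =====

-- B replaces A's two loops by closed-form arithmetic on alternating blocks/bands (O(1) vs O(width/resolution + height)).

-- ===== PORT A =====
-- first while loop of A; fuel is an upper bound on the iteration count (never exhausted when resolution ≥ 1)
def pvALoop1 (width res : Int) : Nat → Int → Int → Int → Bool → Int × Int × Int × Bool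
  | 0, index, wh, bl, cw => (index, wh, bl, cw)
  | fuel+1, index, wh, bl, cw =>
    if index + res ≤ width then
      pvALoop1 width res fuel (index + res)
        (if cw then wh + res else wh) (if cw then bl else bl + res) (!cw)
    else (index, wh, bl, cw)

-- second while loop of A; fuel bounds the iteration count (exactly height - 1 at the call site)
def pvALoop2 (height row1w row1b res : Int) : Nat → Int → Int → Int → Int → Bool → Int
  | 0, _, bl, _, _, _ => bl
  | m+1, wh, bl, ih, iir, cw =>
    if ih < height then
      let wh' := if cw then wh + row1w else wh + row1b
      let bl' := if cw then bl + row1b else bl + row1w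
      if iir + 1 = res ∨ res = 1 then
        pvALoop2 height row1w row1b res m wh' bl' (ih + 1) 0 (!cw)
      else
        pvALoop2 height row1w row1b res m wh' bl' (ih + 1) (iir + 1) cw
    else bl

def count_checkerboard (width : Int) (height : Int) (resolution : Int) : Int :=
  if resolution > width ∧ resolution > height then width * height
  else
    let s := pvALoop1 width resolution (width.toNat + 1) 0 0 0 true
    let wh := if s.2.2.2 then s.2.1 + (width - s.1) else s.2.1
    let bl := if s.2.2.2 then s.2.2.1 else s.2.2.1 + (width - s.1)
    if height ≤ 1 then bl
    else pvALoop2 height wh bl resolution ((height - 1).toNat) wh bl 1 1 (if resolution = 1 then false else true)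

-- ===== PORT B =====
def count_checkerboard_alt (width : Int) (height : Int) (resolution : Int) : Int :=
  if resolution > width ∧ resolution > height then width * height
  else
    let k := max (PySem.Int.floordiv width resolution) 0
    let rem := width - k * resolution
    let rowWhite := PySem.Int.floordiv (k + 1) 2 * resolution + (if PySem.Int.mod k 2 = 0 then rem else 0)
    let rowBlack := PySem.Int.floordiv k 2 * resolution + (if PySem.Int.mod k 2 = 1 then rem else 0)
    if height ≤ 1 then rowBlack
    else
      let q := PySem.Int.floordiv height resolution
      let remr := height - q * resolution
      let whiteRows := PySem.Int.floordiv (q + 1) 2 * resolution + (if PySem.Int.mod q 2 = 0 then remr else 0)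
      whiteRows * rowBlack + (height - whiteRows) * rowWhite

-- ===== PRECONDITION & SPEC =====
-- Pre_ restricts to positive resolution, the task's natural domain: for resolution ≤ 0 the
-- Python A loops forever whenever resolution ≤ width, and on the remaining non-positive
-- resolutions returns accidental values of the skipped loop, which B's closed form does not mimic.
def Pre_count_checkerboard (width : Int) (height : Int) (resolution : Int) : Prop := 1 ≤ resolution
instance (width : Int) (height : Int) (resolution : Int) : Decidable (Pre_count_checkerboard width height resolution) := by unfold Pre_count_checkerboard; infer_instance
def pvWitness_count_checkerboard : Int × Int × Int := (8, 5, 3)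

def Spec_count_checkerboard (width : Int) (height : Int) (resolution : Int) (out : Int) : Prop := out = count_checkerboard_alt width height resolution
instance (width : Int) (height : Int) (resolution : Int) (out : Int) : Decidable (Spec_count_checkerboard width height resolution out) := by unfold Spec_count_checkerboard; infer_instance

-- ===== CLAIM (what is proved, stated in full; the proofs are below) =====
def Claim_equal_count_checkerboard : Prop := ∀ (width : Int) (height : Int) (resolution : Int), Dom_count_checkerboard width height resolution → Pre_count_checkerboard width height resolution → Spec_count_checkerboard width height resolution (count_checkerboard width height resolution)

-- ===== LEMMAS AND PROOFS =====

lemma pvALoop1_run (width res : Int) (hres : 1 ≤ res) :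
    ∀ (n fuel : Nat) (index wh bl : Int) (cw : Bool), n < fuel →
      (n = 0 ∨ index + (n : Int) * res ≤ width) →
      width < index + ((n : Int) + 1) * res →
      pvALoop1 width res fuel index wh bl cw =
        (index + (n : Int) * res,
         wh + res * (if cw then ((n : Int) + 1) / 2 else (n : Int) / 2),
         bl + res * (if cw then (n : Int) / 2 else ((n : Int) + 1) / 2),
         if n % 2 = 0 then cw else !cw) := by
  intro n
  induction n with
  | zero =>
    intro fuel index wh bl cw hfuel _ hub
    obtain ⟨f, rfl⟩ : ∃ f, fuel = f + 1 := ⟨fuel - 1, by omega⟩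
    have hguard : ¬ (index + res ≤ width) := by push_cast at hub; omega
    simp only [pvALoop1, if_neg hguard, Nat.cast_zero, Nat.zero_mod]
    have h12 : ((0:Int) + 1) / 2 = 0 := by decide
    have h02 : ((0:Int)) / 2 = 0 := by decide
    rw [h12, h02]
    cases cw <;> simp
  | succ n ih =>
    intro fuel index wh bl cw hfuel hlb hub
    obtain ⟨f, rfl⟩ : ∃ f, fuel = f + 1 := ⟨fuel - 1, by omega⟩
    have hnn : (0 : Int) ≤ (n : Int) * res := mul_nonneg (by positivity) (by omega)
    have he : ((n : Int) + 1) * res = (n : Int) * res + res := by ring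
    have hlb' : index + ((n : Int) + 1) * res ≤ width := by
      rcases hlb with h | h
      · omega
      · push_cast at h; linarith [h]
    have hguard : index + res ≤ width := by rw [he] at hlb'; linarith
    have hrec := ih f (index + res)
      (if cw then wh + res else wh) (if cw then bl else bl + res) (!cw)
      (by omega)
      (Or.inr (by rw [he] at hlb'; linarith))
      (by push_cast at hub ⊢; linarith [hub])
    simp only [pvALoop1, if_pos hguard, hrec]
    have hcast : ((n + 1 : Nat) : Int) = (n : Int) + 1 := by push_cast; ring
    have h1 : ((n : Int) + 1 + 1) / 2 = (n : Int) / 2 + 1 := by omega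
    rw [Prod.mk.injEq, Prod.mk.injEq, Prod.mk.injEq, hcast]
    refine ⟨by ring, ?_, ?_, ?_⟩
    · cases cw <;> simp [h1] <;> ring
    · cases cw <;> simp [h1] <;> ring
    · rcases Nat.mod_two_eq_zero_or_one n with hp | hp <;>
        cases cw <;> simp [Nat.add_mod, hp]

def pvWcnt (res t : Int) : Int :=
  (t / res + 1) / 2 * res + (if (t / res) % 2 = 0 then t % res else 0)

lemma pvDivStep (res t : Int) (hres : 1 ≤ res) :
    (t % res + 1 < res ∧ (t + 1) / res = t / res ∧ (t + 1) % res = t % res + 1) ∨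
    (t % res + 1 = res ∧ (t + 1) / res = t / res + 1 ∧ (t + 1) % res = 0) := by
  have h0 : t % res = t - res * (t / res) := by rw [Int.emod_def]
  have h1 := Int.emod_nonneg t (by omega : res ≠ 0)
  have h2 := Int.emod_lt_of_pos t (by omega : 0 < res)
  by_cases hc : t % res + 1 < res
  · left
    have h := (Int.ediv_emod_unique (a := t + 1) (b := res)
        (r := t % res + 1) (q := t / res) (by omega)).mpr
        ⟨by linarith, by omega, by omega⟩
    exact ⟨hc, h.1, h.2⟩
  · right
    have hc' : t % res + 1 = res := by omega
    have h := (Int.ediv_emod_unique (a := t + 1) (b := res)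
        (r := 0) (q := t / res + 1) (by omega)).mpr
        ⟨by linarith, by omega, by omega⟩
    exact ⟨hc', h.1, h.2⟩

lemma pvWcnt_succ (res t : Int) (hres : 1 ≤ res) :
    pvWcnt res (t + 1) = pvWcnt res t + (if (t / res) % 2 = 0 then 1 else 0) := by
  rcases pvDivStep res t hres with ⟨_, hq, hr⟩ | ⟨hc, hq, hr⟩
  · unfold pvWcnt
    rw [hq, hr]
    split_ifs <;> ring
  · unfold pvWcnt
    rw [hq, hr]
    rcases Int.even_or_odd (t / res) with ⟨m, hm⟩ | ⟨m, hm⟩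
    · have e1 : (t / res + 1 + 1) / 2 = m + 1 := by omega
      have e2 : (t / res + 1) / 2 = m := by omega
      have p1 : ¬ ((t / res + 1) % 2 = 0) := by omega
      have p2 : (t / res) % 2 = 0 := by omega
      have hrr : t % res = res - 1 := by omega
      rw [e1, e2, if_neg p1, if_pos p2, if_pos p2, hrr]
      ring
    · have e1 : (t / res + 1 + 1) / 2 = m + 1 := by omega
      have e2 : (t / res + 1) / 2 = m + 1 := by omega
      have p1 : (t / res + 1) % 2 = 0 := by omega
      have p2 : ¬ ((t / res) % 2 = 0) := by omega
      rw [e1, e2, if_pos p1, if_neg p2, if_neg p2]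
      ring

lemma pvALoop2_run (row1w row1b res height : Int) (hres : 1 ≤ res) :
    ∀ (m : Nat) (ih iir wh bl : Int),
      (height - ih).toNat = m → 1 ≤ ih → ih ≤ height →
      (res = 1 ∨ iir = ih % res) →
      pvALoop2 height row1w row1b res m wh bl ih iir (decide ((ih / res) % 2 = 0)) =
        bl + (pvWcnt res height - pvWcnt res ih) * row1b
           + ((height - ih) - (pvWcnt res height - pvWcnt res ih)) * row1w := by
  intro m
  induction m with
  | zero =>
    intro ih iir wh bl hm h1 h2 _
    have : ih = height := by omega
    subst this
    simp [pvALoop2]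
  | succ m ihp =>
    intro ih iir wh bl hm h1 h2 hinv
    have hlt : ih < height := by omega
    have hstep := pvWcnt_succ res ih hres
    simp only [pvALoop2, if_pos hlt]
    by_cases hflip : iir + 1 = res ∨ res = 1
    · have hq : (ih + 1) / res = ih / res + 1 ∧ (ih + 1) % res = 0 := by
        rcases hinv with hr1 | hiir
        · subst hr1; simp
        · subst hiir
          rcases pvDivStep res ih hres with ⟨hc, _, _⟩ | ⟨_, hq, hr⟩
          · exfalso
            rcases hflip with h | h
            · omega
            · subst h; omega
          · exact ⟨hq, hr⟩
      have hcw : (!decide ((ih / res) % 2 = 0)) = decide (((ih + 1) / res) % 2 = 0) := by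
        rw [hq.1]
        by_cases hp : (ih / res) % 2 = 0
        · have hp' : ¬ ((ih / res + 1) % 2 = 0) := by omega
          simp [hp, hp']
        · have hp' : (ih / res + 1) % 2 = 0 := by omega
          simp [hp, hp']
      rw [if_pos hflip, hcw,
        ihp (ih + 1) 0 _ _ (by omega) (by omega) (by omega) (Or.inr hq.2.symm), hstep]
      by_cases hp : (ih / res) % 2 = 0
      · have hd : decide ((ih / res) % 2 = 0) = true := by simp [hp]
        rw [hd, if_pos hp]
        simp only [reduceIte]; ring
      · have hd : decide ((ih / res) % 2 = 0) = false := by simp [hp]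
        rw [hd, if_neg hp]
        simp only [Bool.false_eq_true, reduceIte]; ring
    · push_neg at hflip
      have hiir : iir = ih % res := by
        rcases hinv with hr1 | hiir
        · exact absurd hr1 hflip.2
        · exact hiir
      have hnb : ih % res + 1 < res := by
        have h1' := Int.emod_nonneg ih (by omega : res ≠ 0)
        have h2' := Int.emod_lt_of_pos ih (by omega : 0 < res)
        omega
      obtain ⟨_, hq, hr⟩ := (pvDivStep res ih hres).resolve_right (by omega)
      rw [if_neg (by push_neg; exact hflip)]
      have hcw : decide ((ih / res) % 2 = 0) = decide (((ih + 1) / res) % 2 = 0) := by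
        rw [hq]
      simp only [hcw]
      rw [ihp (ih + 1) (iir + 1) _ _ (by omega) (by omega) (by omega)
            (Or.inr (by rw [hiir, hr])), hstep]
      simp only [hq]
      by_cases hp : (ih / res) % 2 = 0
      · have hd : decide ((ih / res) % 2 = 0) = true := by simp [hp]
        rw [hd, if_pos hp]
        simp only [reduceIte]; ring
      · have hd : decide ((ih / res) % 2 = 0) = false := by simp [hp]
        rw [hd, if_neg hp]
        simp only [Bool.false_eq_true, reduceIte]; ring

lemma pvWcnt_one (res : Int) (hres : 1 ≤ res) : pvWcnt res 1 = 1 := by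
  unfold pvWcnt
  by_cases h1 : res = 1
  · subst h1; decide
  · have hq : (1 : Int) / res = 0 := Int.ediv_eq_zero_of_lt (by omega) (by omega)
    have hr : (1 : Int) % res = 1 := Int.emod_eq_of_lt (by omega) (by omega)
    rw [hq, hr]
    norm_num

-- ===== VERDICT (by name: the statement is the Claim_ definition above) =====
theorem count_checkerboard_spec : Claim_equal_count_checkerboard := by
  intro width height res _ hpre
  have hres : (1 : Int) ≤ res := hpre
  unfold Spec_count_checkerboard
  simp only [count_checkerboard, count_checkerboard_alt]
  by_cases hbig : res > width ∧ res > height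
  · simp [hbig]
  · simp only [hbig, if_false]
    -- facts about the quotient/remainder of width by res
    have h0 : res * (width / res) + width % res = width := Int.ediv_add_emod width res
    have h1 := Int.emod_nonneg width (by omega : res ≠ 0)
    have h2 := Int.emod_lt_of_pos width (by omega : 0 < res)
    obtain ⟨d, hd⟩ : ∃ d : Int, width / res = d := ⟨_, rfl⟩
    obtain ⟨r0, hr0⟩ : ∃ r0 : Int, width % res = r0 := ⟨_, rfl⟩
    rw [hd, hr0] at h0; rw [hr0] at h1 h2
    obtain ⟨n, hn⟩ : ∃ n : Nat, (n : Int) = max d 0 := ⟨d.toNat, by rw [Int.toNat_eq_max]⟩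
    have hdsign : 0 ≤ width → 0 ≤ d := by intro hw; rw [← hd]; exact Int.ediv_nonneg hw (by omega)
    have hdneg : width < 0 → d < 0 := by
      intro hw
      by_contra hcon
      push_neg at hcon
      nlinarith
    have hfuel : n < width.toNat + 1 := by
      by_cases hw : 0 ≤ width
      · have hle : d ≤ width := by rw [← hd]; exact Int.ediv_le_self res hw
        have := hdsign hw
        omega
      · have := hdneg (by omega)
        omega
    have hlb : n = 0 ∨ (0 : Int) + (n : Int) * res ≤ width := by
      by_cases hd0 : d < 0
      · left; omega
      · right
        have hnd : (n : Int) = d := by omega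
        rw [hnd]
        nlinarith
    have hub : width < (0 : Int) + ((n : Int) + 1) * res := by
      by_cases hd0 : d < 0
      · have hnd : (n : Int) = 0 := by omega
        rw [hnd]
        nlinarith
      · have hnd : (n : Int) = d := by omega
        rw [hnd]
        nlinarith
    rw [pvALoop1_run width res hres n (width.toNat + 1) 0 0 0 true hfuel hlb hub]
    -- fold B's integer primitives into ediv/emod
    have hk : max (PySem.Int.floordiv width res) 0 = (n : Int) := by
      rw [PySem.Int.floordiv_eq_ediv_of_pos (show (0 : Int) < res by omega), hd]
      omega
    have e1 : PySem.Int.floordiv height res = height / res :=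
      PySem.Int.floordiv_eq_ediv_of_pos (by omega)
    have e2 : ∀ x : Int, PySem.Int.floordiv x 2 = x / 2 := fun x =>
      PySem.Int.floordiv_eq_ediv_of_pos (by omega)
    have e3 : ∀ x : Int, PySem.Int.mod x 2 = x % 2 := fun x =>
      PySem.Int.mod_eq_emod_of_pos (by omega)
    rw [hk]
    simp only [e1, e2, e3]
    -- initial colour of the second loop equals the band parity of row 1
    have hcw0 : (!decide (res = 1)) = decide (((1 : Int) / res) % 2 = 0) := by
      by_cases hr1 : res = 1
      · subst hr1; decide
      · have : (1 : Int) / res = 0 := Int.ediv_eq_zero_of_lt (by omega) (by omega)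
        simp [hr1, this]
    have hinv : res = 1 ∨ (1 : Int) = 1 % res := by
      by_cases hr1 : res = 1
      · exact Or.inl hr1
      · exact Or.inr (Int.emod_eq_of_lt (by omega) (by omega)).symm
    -- B's whiteRows is pvWcnt res height
    have hm : height % res = height - height / res * res := by
      rw [Int.emod_def]; ring
    have hWc : pvWcnt res height = (height / res + 1) / 2 * res +
        (if (2 ∣ height / res : Prop) then height - height / res * res else 0) := by
      unfold pvWcnt
      rw [hm]
      simp only [Int.dvd_iff_emod_eq_zero]
    rcases Nat.mod_two_eq_zero_or_one n with hp | hp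
    · have hpI : ((n : Int)) % 2 = 0 := by omega
      have hpI1 : ¬ (((n : Int)) % 2 = 1) := by omega
      simp only [hp, reduceIte, if_pos hpI, if_neg hpI1]
      norm_num
      by_cases hh : height ≤ 1
      · simp only [if_pos hh]
        ring
      · simp only [if_neg hh]
        rw [hcw0, pvALoop2_run _ _ res height hres (height.toNat - 1) 1 1 _ _
              (by omega) (by omega) (by omega) hinv, pvWcnt_one res hres, hWc]
        ring
    · have hpI : ¬ (((n : Int)) % 2 = 0) := by omega
      have hpI1 : ((n : Int)) % 2 = 1 := by omega
      simp only [hp, reduceIte, if_neg hpI, if_pos hpI1]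
      norm_num
      by_cases hh : height ≤ 1
      · simp only [if_pos hh]
        ring
      · simp only [if_neg hh]
        rw [hcw0, pvALoop2_run _ _ res height hres (height.toNat - 1) 1 1 _ _
              (by omega) (by omega) (by omega) hinv, pvWcnt_one res hres, hWc]
        ring
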